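-- pv_equiv track=rewrite | github.com/aswathas/chaintrace | backend/core/labeler/heuristic.py | _deploys_exploited_contract
-- ===== SOURCE A (Python) =====
-- def _deploys_exploited_contract(wallet: dict, inflows: list[dict]) -> bool:
--     """Wallet deployed a contract that later received large hack-labeled inflows."""
--     is_deployer = wallet.get("deployed_contracts", [])
--     if not is_deployer:
--         return False
--     # Check if any deployed contract address received exploit-tagged inflows
--     deployed = {c.lower() for c in is_deployer}
--     exploit_sources = any(
--         t.get("label", "").lower() in ("exploit", "hack", "stolen")
--         and t.get("src", "").lower() in deployed
--         for t in inflows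
--     )
--     return exploit_sources
-- ===== SOURCE B (Python) =====
-- def _deploys_exploited_contract(wallet: dict, inflows: list[dict]) -> bool:
--     """Wallet deployed a contract that later received large hack-labeled inflows."""
--     is_deployer = wallet.get("deployed_contracts", [])
--     if not is_deployer:
--         return False
--
--     def _tainted(addr: str) -> bool:
--         # Does any exploit-labeled inflow originate from this address?
--         return any(
--             t.get("label", "").lower() in ("exploit", "hack", "stolen")
--             and t.get("src", "").lower() == addr
--             for t in inflows
--         )
--
--     return any(_tainted(c.lower()) for c in is_deployer)
-- ===== Notes on version B (the rewrite author's own statement) =====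
-- stated objective: alternative
-- what changed: A builds a lowercased set of deployed addresses and scans inflows once testing membership; B builds no set at all and instead iterates over the deployed contracts, checking each address directly against the inflows with a nested scan (per-address helper), i.e. the loops are inverted and the hash set disappears.
import Mathlib
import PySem

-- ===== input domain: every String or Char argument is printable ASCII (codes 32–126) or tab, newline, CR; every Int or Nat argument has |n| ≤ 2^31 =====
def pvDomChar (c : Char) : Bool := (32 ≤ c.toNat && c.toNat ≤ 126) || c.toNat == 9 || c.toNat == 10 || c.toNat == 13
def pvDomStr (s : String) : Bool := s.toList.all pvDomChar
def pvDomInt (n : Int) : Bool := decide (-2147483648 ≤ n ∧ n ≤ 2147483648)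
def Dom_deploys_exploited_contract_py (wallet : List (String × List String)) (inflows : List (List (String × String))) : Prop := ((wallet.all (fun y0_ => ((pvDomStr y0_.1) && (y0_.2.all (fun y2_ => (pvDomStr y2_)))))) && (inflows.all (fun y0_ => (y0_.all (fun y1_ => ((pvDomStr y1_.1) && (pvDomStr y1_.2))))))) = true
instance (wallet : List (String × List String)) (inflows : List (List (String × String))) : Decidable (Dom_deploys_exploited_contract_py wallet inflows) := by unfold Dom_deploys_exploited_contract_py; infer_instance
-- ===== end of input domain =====

-- B inverts the loops: it iterates over the deployed contracts and checks each address against the inflows directly, building no set (alternative decomposition, nested scan instead of set membership).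


-- ===== PORT A =====
def deploys_exploited_contract_py (wallet : List (String × List String)) (inflows : List (List (String × String))) : Bool :=
  let is_deployer := PySem.Dict.getD (PySem.Dict.mk wallet) "deployed_contracts" []
  if is_deployer.isEmpty then false
  else
    let deployed : PySem.Set String := PySem.Set.ofList (is_deployer.map PySem.Str.lower)
    inflows.any (fun t =>
      ["exploit", "hack", "stolen"].contains (PySem.Str.lower (PySem.Dict.getD (PySem.Dict.mk t) "label" "")) &&
      PySem.Set.contains deployed (PySem.Str.lower (PySem.Dict.getD (PySem.Dict.mk t) "src" "")))

-- ===== PORT B =====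
-- helper _tainted: does any exploit-labeled inflow originate from this address?
def pvTainted (inflows : List (List (String × String))) (addr : String) : Bool :=
  inflows.any (fun t =>
    ["exploit", "hack", "stolen"].contains (PySem.Str.lower (PySem.Dict.getD (PySem.Dict.mk t) "label" "")) &&
    PySem.Str.lower (PySem.Dict.getD (PySem.Dict.mk t) "src" "") == addr)

def deploys_exploited_contract_py_alt (wallet : List (String × List String)) (inflows : List (List (String × String))) : Bool :=
  let is_deployer := PySem.Dict.getD (PySem.Dict.mk wallet) "deployed_contracts" []
  if is_deployer.isEmpty then false
  else is_deployer.any (fun c => pvTainted inflows (PySem.Str.lower c))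

-- ===== PRECONDITION & SPEC =====
def Spec_deploys_exploited_contract_py (wallet : List (String × List String)) (inflows : List (List (String × String))) (out : Bool) : Prop := out = deploys_exploited_contract_py_alt wallet inflows
instance (wallet : List (String × List String)) (inflows : List (List (String × String))) (out : Bool) : Decidable (Spec_deploys_exploited_contract_py wallet inflows out) := by unfold Spec_deploys_exploited_contract_py; infer_instance

-- ===== CLAIM (what is proved, stated in full; the proofs are below) =====
def Claim_equal_deploys_exploited_contract_py : Prop := ∀ (wallet : List (String × List String)) (inflows : List (List (String × String))), Dom_deploys_exploited_contract_py wallet inflows → Spec_deploys_exploited_contract_py wallet inflows (deploys_exploited_contract_py wallet inflows)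

-- ===== LEMMAS AND PROOFS =====

-- ===== VERDICT (by name: the statement is the Claim_ definition above) =====
theorem deploys_exploited_contract_py_spec : Claim_equal_deploys_exploited_contract_py := by
  intro wallet inflows _
  unfold Spec_deploys_exploited_contract_py
  unfold deploys_exploited_contract_py deploys_exploited_contract_py_alt pvTainted
  dsimp only
  split
  · rfl
  · rw [Bool.eq_iff_iff]
    simp only [List.any_eq_true, Bool.and_eq_true, PySem.Set.contains_iff,
      PySem.Set.mem_ofList, List.mem_map, beq_iff_eq]
    constructor
    · rintro ⟨t, ht, hl, c, hc, hsrc⟩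
      exact ⟨c, hc, t, ht, hl, hsrc.symm⟩
    · rintro ⟨c, hc, t, ht, hl, hsrc⟩
      exact ⟨t, ht, hl, c, hc, hsrc.symm⟩
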